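-- pv_equiv track=rewrite | github.com/lambda1337/Lexer_sintaxis | automatas.py | a_multiplicacion
-- ===== SOURCE A (Python) =====
-- ESTADO_FINAL = "ESTADO FINAL"                                                        #
--
-- ESTADO_TRAMPA = "ESTADO TRAMPA"                                                #
--
-- def a_multiplicacion(cadena):
--     estado_actual = 0
--     for letra in cadena:
--         if estado_actual == 0 and letra == "*":
--             estado_actual = 1
--         else:
--             estado_actual = -1
--             return ESTADO_TRAMPA
--     return ESTADO_FINAL
-- ===== SOURCE B (Python) =====
-- ESTADO_FINAL = "ESTADO FINAL"
-- ESTADO_TRAMPA = "ESTADO TRAMPA"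
--
-- def a_multiplicacion(cadena):
--     items = list(cadena)
--     return ESTADO_FINAL if items == [] or items == ["*"] else ESTADO_TRAMPA
-- ===== Notes on version B (the rewrite author's own statement) =====
-- stated objective: simpler
-- what changed: Replaces the character-by-character DFA state loop with a closed-form check that the whole input is empty or a single asterisk.
import Mathlib
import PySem

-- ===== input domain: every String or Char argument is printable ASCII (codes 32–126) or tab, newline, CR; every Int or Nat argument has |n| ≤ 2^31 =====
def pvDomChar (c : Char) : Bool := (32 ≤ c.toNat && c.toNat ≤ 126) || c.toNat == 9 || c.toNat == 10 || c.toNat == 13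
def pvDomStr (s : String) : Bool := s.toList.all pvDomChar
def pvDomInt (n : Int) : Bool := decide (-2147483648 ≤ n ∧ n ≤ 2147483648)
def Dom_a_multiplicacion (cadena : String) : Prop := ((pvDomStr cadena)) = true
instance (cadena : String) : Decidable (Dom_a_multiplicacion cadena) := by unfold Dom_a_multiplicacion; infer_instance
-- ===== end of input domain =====

-- B replaces A's DFA state loop with a closed-form whole-string comparison (objective: simpler).


-- ===== PORT A =====
-- the for-loop with early return: step over chars carrying estado_actual
def aMultLoop (estado_actual : Int) (letras : List Char) : String :=
  match letras with
  | [] => "ESTADO FINAL"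
  | letra :: rest =>
    if estado_actual == 0 && letra == '*' then aMultLoop 1 rest
    else "ESTADO TRAMPA"

def a_multiplicacion (cadena : String) : String :=
  aMultLoop 0 cadena.toList

-- ===== PORT B =====
def a_multiplicacion_alt (cadena : String) : String :=
  let items := cadena.toList
  if items = [] ∨ items = ['*'] then "ESTADO FINAL" else "ESTADO TRAMPA"

-- ===== PRECONDITION & SPEC =====
def Spec_a_multiplicacion (cadena : String) (out : String) : Prop := out = a_multiplicacion_alt cadena
instance (cadena : String) (out : String) : Decidable (Spec_a_multiplicacion cadena out) := by unfold Spec_a_multiplicacion; infer_instance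

-- ===== CLAIM (what is proved, stated in full; the proofs are below) =====
def Claim_equal_a_multiplicacion : Prop := ∀ (cadena : String), Dom_a_multiplicacion cadena → Spec_a_multiplicacion cadena (a_multiplicacion cadena)

-- ===== LEMMAS AND PROOFS =====
theorem aMultLoop_char : ∀ (l : List Char),
    aMultLoop 0 l = (if l = [] ∨ l = ['*'] then "ESTADO FINAL" else "ESTADO TRAMPA") := by
  intro l
  match l with
  | [] => simp [aMultLoop]
  | c :: rest =>
    by_cases hc : c = '*'
    · subst hc
      cases rest with
      | nil => simp [aMultLoop]
      | cons d rest' => simp [aMultLoop]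
    · simp [aMultLoop, hc]

-- ===== VERDICT (by name: the statement is the Claim_ definition above) =====
theorem a_multiplicacion_spec : Claim_equal_a_multiplicacion := by
  intro cadena _
  unfold Spec_a_multiplicacion a_multiplicacion a_multiplicacion_alt
  exact aMultLoop_char cadena.toList
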